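-- pv_equiv track=rewrite | github.com/mysliwietzflorian/advent-of-code | 2023/07/b.py | calc_hash
-- ===== SOURCE A (Python) =====
-- replace = {
--     'T': 'A',
--     'J': 'B',
--     'Q': 'C',
--     'K': 'D',
--     'A': 'E',
-- }
--
-- def replace_card(card, use_wildcard = False):
--     if use_wildcard and card == 'J':
--         return '1'
--
--     if card in replace.keys():
--         return replace[card]
--     return card
--
-- def get_hand_type(hand, use_wildcard = False):
--     hist = {}
--     for card in hand:
--         hist.setdefault(card, 0)
--         hist[card] += 1
--
--     wildcard_key = replace['J']
--     wildcard_count = 0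
--     if use_wildcard and wildcard_key in hist:
--         wildcard_count = hist[wildcard_key]
--         del hist[wildcard_key]
--
--     m = max(hist.values(), default=0) + wildcard_count
--     l = len(hist.values())
--
--     if m == 5:
--         return str(6) # 5 of a kind
--     if m == 4:
--         return str(5) # 4 of a kind
--     elif m == 3 and l == 2:
--         return str(4) # full house
--     elif m == 3: #
--         return str(3) # 3 of a kind
--     elif m == 2 and l == 3:
--         return str(2) # two pairs
--     elif m == 2:
--         return str(1) # one pair
--     else:
--         return str(0) # high card
--
-- def calc_hash(hand):
--     hex_code_wildcard = ''
--     hex_code = ''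
--     for card in hand:
--         hex_code_wildcard += replace_card(card, True)
--         hex_code += replace_card(card, False)
--
--     hand_type = get_hand_type(hex_code, True)
--     hex_code = hand_type + hex_code_wildcard
--     return int(hex_code, 16)
-- ===== SOURCE B (Python) =====
-- def calc_hash(hand):
--     REPL = {'T': 'A', 'J': 'B', 'Q': 'C', 'K': 'D', 'A': 'E'}
--     HEX = '0123456789abcdef'
--     acc = 0
--     counts = {}
--     for card in hand:
--         ident = REPL.get(card, card)
--         v = 1 if card == 'J' else HEX.index(ident.lower())
--         acc = acc * 16 + v
--         counts[ident] = counts.get(ident, 0) + 1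
--     wc = counts.pop('B', 0)
--     m = max(counts.values(), default=0) + wc
--     l = len(counts)
--     t = {(3, 2): 4, (2, 3): 2}.get((m, l), {5: 6, 4: 5, 3: 3, 2: 1}.get(m, 0))
--     return t * 16 ** len(hand) + acc
-- ===== Notes on version B (the rewrite author's own statement) =====
-- stated objective: simpler
-- what changed: B replaces A's two built code strings, separate histogram helper with if-chain, and final int(code,16) re-parse by a single loop that accumulates the numeric code arithmetically while counting cards, then reads the hand type from a (m,l)-keyed dict table.
-- outside the precondition, e.g. on calc_hash('0_1'): A returns 1, B raises ValueError; on calc_hash('A '): A returns 14, B raises ValueError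
import Mathlib
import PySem

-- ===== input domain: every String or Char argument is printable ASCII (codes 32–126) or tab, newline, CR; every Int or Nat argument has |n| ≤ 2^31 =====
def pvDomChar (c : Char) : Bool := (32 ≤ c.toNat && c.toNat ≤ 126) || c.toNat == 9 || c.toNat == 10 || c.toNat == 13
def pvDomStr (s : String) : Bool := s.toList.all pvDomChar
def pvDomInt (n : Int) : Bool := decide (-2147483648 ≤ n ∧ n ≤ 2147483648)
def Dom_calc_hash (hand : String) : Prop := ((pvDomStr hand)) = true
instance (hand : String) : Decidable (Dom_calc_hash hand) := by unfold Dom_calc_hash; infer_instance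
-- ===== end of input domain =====

-- B replaces A's two built strings + hand-type if-chain + int(...,16) re-parse by one numeric
-- accumulation loop and a table lookup on (m, l); objective: simpler (no speed claim).

-- ===== PORT A =====
-- the module-level 'replace' dict
def pvReplace : PySem.Dict Char Char :=
  PySem.Dict.ofList [('T', 'A'), ('J', 'B'), ('Q', 'C'), ('K', 'D'), ('A', 'E')]

def replace_card (card : Char) (use_wildcard : Bool) : Char :=
  if use_wildcard && card == 'J' then '1'
  else if pvReplace.contains card then (pvReplace.get? card).getD card
  else card

-- digit value used by int(s, 16); exact on hex-digit characters (Pre_ guarantees the parsed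
-- string consists of hex digits only — Python's extra int() literal syntax is outside Pre_)
def pvHexVal (c : Char) : Int :=
  if 48 ≤ c.toNat ∧ c.toNat ≤ 57 then (c.toNat : Int) - 48
  else if 97 ≤ c.toNat ∧ c.toNat ≤ 102 then (c.toNat : Int) - 87
  else if 65 ≤ c.toNat ∧ c.toNat ≤ 70 then (c.toNat : Int) - 55
  else 0

-- int(s, 16) on a nonempty string of hex digits (exact on Pre_)
def pvParseHex (cs : List Char) : Int := cs.foldl (fun a c => 16 * a + pvHexVal c) 0

def get_hand_type (hand : List Char) (use_wildcard : Bool) : String :=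
  let hist : PySem.Dict Char Int :=
    hand.foldl (fun d card =>
      let d := d.setdefault card 0
      d.insert card (d.getD card 0 + 1)) PySem.Dict.empty
  let wildcard_key : Char := (pvReplace.get? 'J').getD 'J'
  let wc : Int × PySem.Dict Char Int :=
    if use_wildcard && hist.contains wildcard_key then (hist.getD wildcard_key 0, hist.erase wildcard_key)
    else (0, hist)
  let m : Int := (PySem.List.maxD wc.2.values (fun x => x) 0) + wc.1
  let l : Int := wc.2.values.length
  if m = 5 then "6"
  else if m = 4 then "5"
  else if m = 3 ∧ l = 2 then "4"
  else if m = 3 then "3"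
  else if m = 2 ∧ l = 3 then "2"
  else if m = 2 then "1"
  else "0"

def calc_hash (hand : String) : Int :=
  let codes : List Char × List Char :=
    hand.toList.foldl (fun (p : List Char × List Char) card =>
      (p.1 ++ [replace_card card true], p.2 ++ [replace_card card false])) ([], [])
  let hand_type := get_hand_type codes.2 true
  pvParseHex (hand_type.toList ++ codes.1)

-- ===== PORT B =====
def pvRepl : PySem.Dict Char Char :=
  PySem.Dict.ofList [('T', 'A'), ('J', 'B'), ('Q', 'C'), ('K', 'D'), ('A', 'E')]

def pvHexChars : List Char := "0123456789abcdef".toList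

-- card's numeric value in the sortable code: HEX.index(ident.lower()), J ↦ 1
def pvCardVal (card : Char) : Int :=
  if card == 'J' then 1
  else (PySem.List.index? pvHexChars (PySem.Chars.lowerChar ((pvRepl.get? card).getD card))).getD 0

def calc_hash_alt (hand : String) : Int :=
  let st : Int × PySem.Dict Char Int :=
    hand.toList.foldl (fun (st : Int × PySem.Dict Char Int) card =>
      let ident := (pvRepl.get? card).getD card
      (st.1 * 16 + pvCardVal card, st.2.insert ident (st.2.getD ident 0 + 1))) (0, PySem.Dict.empty)
  let wc : Int := st.2.getD 'B' 0
  let counts := st.2.erase 'B'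
  let m : Int := (PySem.List.maxD counts.values (fun x => x) 0) + wc
  let l : Int := counts.values.length
  let t : Int :=
    ((PySem.Dict.mk [((3, 2), (4 : Int)), ((2, 3), 2)]).get? (m, l)).getD
      (((PySem.Dict.mk [((5 : Int), (6 : Int)), (4, 5), (3, 3), (2, 1)]).get? m).getD 0)
  t * 16 ^ hand.toList.length + st.1

-- ===== PRECONDITION & SPEC =====
-- Pre_ admits hands made of card/hex characters only; on other hands A raises ValueError from
-- int(...,16) except where int()'s literal syntax accidentally tolerates the stray characters
-- (underscores between digits, trailing whitespace), and there B raises ValueError instead.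
def pvAllowed : List Char :=
  ['0','1','2','3','4','5','6','7','8','9','a','b','c','d','e','f','A','B','C','D','E','F','T','J','Q','K']

def Pre_calc_hash (hand : String) : Prop := (hand.toList.all (fun c => pvAllowed.contains c)) = true
instance (hand : String) : Decidable (Pre_calc_hash hand) := by unfold Pre_calc_hash; infer_instance

def pvWitness_calc_hash : String := "5"

def Spec_calc_hash (hand : String) (out : Int) : Prop := out = calc_hash_alt hand
instance (hand : String) (out : Int) : Decidable (Spec_calc_hash hand out) := by unfold Spec_calc_hash; infer_instance

-- ===== CLAIM (what is proved, stated in full; the proofs are below) =====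
def Claim_equal_calc_hash : Prop := ∀ (hand : String), Dom_calc_hash hand → Pre_calc_hash hand → Spec_calc_hash hand (calc_hash hand)

-- ===== LEMMAS AND PROOFS =====

-- A's 'if in replace: replace[card]' equals B's REPL.get(card, card)
theorem pv_rep_eq (c : Char) : replace_card c false = (pvRepl.get? c).getD c := by
  unfold replace_card pvRepl pvReplace
  rw [PySem.Dict.contains_eq_isSome_get?]
  cases h : PySem.Dict.get? (PySem.Dict.ofList [('T', 'A'), ('J', 'B'), ('Q', 'C'), ('K', 'D'), ('A', 'E')]) c <;>
    simp_all

-- A's setdefault-then-increment step is a plain counting insert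
theorem pv_stepA (d : PySem.Dict Char Int) (k : Char) :
    (d.setdefault k 0).insert k ((d.setdefault k 0).getD k 0 + 1) = d.insert k (d.getD k 0 + 1) := by
  by_cases h : d.contains k = true
  · rw [PySem.Dict.setdefault_of_contains d 0 h]
  · rw [PySem.Dict.setdefault_of_not_contains d 0 (by simpa using h)]
    rw [PySem.Dict.getD_insert_self, PySem.Dict.insert_insert_self,
      PySem.Dict.getD_of_not_contains d 0 (by simpa using h)]

theorem pv_erase_not_contains (d : PySem.Dict Char Int) (k : Char) (h : d.contains k = false) :
    d.erase k = d := by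
  apply PySem.Dict.ext
  show (d.items.filter fun p => !(p.1 == k)) = d.items
  rw [List.filter_eq_self]
  intro p hp
  simp only [PySem.Dict.contains, List.any_eq_false] at h
  simpa using h p hp

-- int(s,16) digit-shift: folding from a is a * 16^len + folding from 0
theorem pv_parse_shift (cs : List Char) (a : Int) :
    cs.foldl (fun acc c => 16 * acc + pvHexVal c) a
      = a * 16 ^ cs.length + cs.foldl (fun acc c => 16 * acc + pvHexVal c) 0 := by
  induction cs generalizing a with
  | nil => simp
  | cons c t ih =>
    simp only [List.foldl_cons, List.length_cons]
    rw [ih (16 * a + pvHexVal c), ih (16 * 0 + pvHexVal c)]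
    ring

-- the sortable value of each admitted card agrees between the two ports
theorem pv_val_eq : ∀ c ∈ pvAllowed, pvHexVal (replace_card c true) = pvCardVal c := by
  intro c hc
  fin_cases hc <;> rfl

-- B's (m,l)-table lookup written as A's if-chain
theorem pv_t (m l : Int) :
    (((PySem.Dict.mk [(((3 : Int), (2 : Int)), (4 : Int)), ((2, 3), 2)]).get? (m, l)).getD
        (((PySem.Dict.mk [((5 : Int), (6 : Int)), (4, 5), (3, 3), (2, 1)]).get? m).getD 0))
      = if m = 5 then 6 else if m = 4 then 5 else if m = 3 ∧ l = 2 then 4 else if m = 3 then 3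
        else if m = 2 ∧ l = 3 then 2 else if m = 2 then 1 else 0 := by
  simp only [PySem.Dict.get?_mk_cons, beq_iff_eq, Prod.mk.injEq,
    show ∀ x : Int × Int, (PySem.Dict.mk ([] : List ((Int × Int) × Int))).get? x = none from fun _ => rfl,
    show ∀ x : Int, (PySem.Dict.mk ([] : List (Int × Int))).get? x = none from fun _ => rfl]
  split_ifs <;> simp only [Option.getD_some, Option.getD_none] <;> omega

-- hex value of each literal type character
theorem pv_hv6 : pvHexVal '6' = 6 := by decide
theorem pv_hv5 : pvHexVal '5' = 5 := by decide
theorem pv_hv4 : pvHexVal '4' = 4 := by decide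
theorem pv_hv3 : pvHexVal '3' = 3 := by decide
theorem pv_hv2 : pvHexVal '2' = 2 := by decide
theorem pv_hv1 : pvHexVal '1' = 1 := by decide
theorem pv_hv0 : pvHexVal '0' = 0 := by decide


-- prepending the type digit shifts the remaining code by 16^len
theorem pv_parse_cons (c : Char) (ws : List Char) :
    pvParseHex (c :: ws) = pvHexVal c * 16 ^ ws.length + pvParseHex ws := by
  unfold pvParseHex
  simp only [List.foldl_cons]
  rw [pv_parse_shift]
  norm_num

-- the whole tail of both programs, with the shared m and l generalized
theorem pv_final (m lv : Int) (l : List Char) (hpre : ∀ c ∈ l, c ∈ pvAllowed) :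
    pvParseHex ((if m = 5 then "6" else if m = 4 then "5" else if m = 3 ∧ lv = 2 then "4"
          else if m = 3 then "3" else if m = 2 ∧ lv = 3 then "2" else if m = 2 then "1"
          else "0").toList
        ++ l.map (fun c => replace_card c true))
      = (if m = 5 then 6 else if m = 4 then 5 else if m = 3 ∧ lv = 2 then 4 else if m = 3 then 3
          else if m = 2 ∧ lv = 3 then 2 else if m = 2 then 1 else 0) * 16 ^ l.length
        + l.foldl (fun a c => a * 16 + pvCardVal c) 0 := by
  have hacc : pvParseHex (l.map fun c => replace_card c true)
      = l.foldl (fun a c => a * 16 + pvCardVal c) 0 := by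
    unfold pvParseHex
    rw [List.foldl_map]
    exact PySem.List.foldl_congr_mem' l _ _ 0 (fun c hc acc => by rw [pv_val_eq c (hpre c hc)]; ring)
  have hlen : (l.map fun c => replace_card c true).length = l.length := List.length_map ..
  split_ifs <;>
    simp only [show ("6" : String).toList = ['6'] from rfl, show ("5" : String).toList = ['5'] from rfl,
      show ("4" : String).toList = ['4'] from rfl, show ("3" : String).toList = ['3'] from rfl,
      show ("2" : String).toList = ['2'] from rfl, show ("1" : String).toList = ['1'] from rfl,
      show ("0" : String).toList = ['0'] from rfl, List.singleton_append, pv_parse_cons,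
      pv_hv6, pv_hv5, pv_hv4, pv_hv3, pv_hv2, pv_hv1, pv_hv0, hacc, hlen]

-- ===== VERDICT (by name: the statement is the Claim_ definition above) =====
theorem calc_hash_spec : Claim_equal_calc_hash := by
  intro hand _ hpre0
  have hpre : ∀ c ∈ hand.toList, c ∈ pvAllowed := by
    intro c hc
    have h1 : hand.toList.all (fun c => pvAllowed.contains c) = true := hpre0
    rw [List.all_eq_true] at h1
    simpa using h1 c hc
  unfold Spec_calc_hash calc_hash calc_hash_alt get_hand_type
  rw [PySem.List.foldl_prod_mk (f := fun acc card => acc ++ [replace_card card true])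
      (g := fun acc card => acc ++ [replace_card card false])]
  rw [PySem.List.foldl_prod_mk
      (f := fun acc card => acc * 16 + pvCardVal card)
      (g := fun (d : PySem.Dict Char Int) card =>
        d.insert ((pvRepl.get? card).getD card) (d.getD ((pvRepl.get? card).getD card) 0 + 1))]
  simp only [PySem.List.foldl_append_singleton_eq_map, List.nil_append]
  rw [List.foldl_map]
  simp only [pv_stepA, pv_rep_eq]
  rw [show ((pvReplace.get? 'J').getD 'J') = 'B' from rfl]
  simp only [Bool.true_and]
  set D := hand.toList.foldl
      (fun (d : PySem.Dict Char Int) c =>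
        d.insert ((pvRepl.get? c).getD c) (d.getD ((pvRepl.get? c).getD c) 0 + 1))
      PySem.Dict.empty with hD
  by_cases hcon : D.contains 'B' = true
  · rw [if_pos hcon]
    try dsimp only
    rw [pv_t]
    exact pv_final _ _ _ hpre
  · rw [if_neg hcon]
    try dsimp only
    rw [pv_t, PySem.Dict.getD_of_not_contains D 0 (by simpa using hcon),
      pv_erase_not_contains D 'B' (by simpa using hcon)]
    exact pv_final _ _ _ hpre
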